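-- pv_equiv track=rewrite | github.com/Ivan-71-ua/Soleved-Competitive-Problem-Py- | LeetCode/2901.py | getWordsInLongestSubsequence
-- ===== SOURCE A (Python) =====
-- from typing import List
--
-- def getWordsInLongestSubsequence(words: List[str], groups: List[int]) -> List[str]:
--     def check(s1, s2):
--         if len(s1) != len(s2):
--             return False
--         diff = 0
--         for i in range(len(s1)):
--             diff += (s1[i] != s2[i])
--         return diff == 1
--     n = len(words)
--     dp = [1] * n
--     prev = [-1] * n
--     maxs = 1
--     for i in range(1, n):
--         for j in range(i):
--             if groups[i] != groups[j] and check(words[i], words[j]) and dp[i] < dp[j] + 1: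
--                 dp[i] = dp[j] +1
--                 prev[i] = j
--         maxs = max(maxs, dp[i])
--
--     res = []
--     for i in range(n):
--         if dp[i] == maxs:
--             while i != -1:
--                 res.append(words[i])
--                 i = prev[i]
--             break
--     res.reverse()
--     return res
-- ===== SOURCE B (Python) =====
-- from typing import List
--
-- def getWordsInLongestSubsequence(words: List[str], groups: List[int]) -> List[str]:
--     def ham1(s1, s2):
--         return len(s1) == len(s2) and sum(a != b for a, b in zip(s1, s2)) == 1
--     best = []  # best[i] = the chain A's DP would reconstruct ending at i
--     for i in range(len(words)):
--         cur = [words[i]]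
--         for j in range(i):
--             if groups[i] != groups[j] and ham1(words[i], words[j]) and len(best[j]) + 1 > len(cur):
--                 cur = best[j] + [words[i]]
--         best.append(cur)
--     maxs = max((len(b) for b in best), default=0)
--     for b in best:
--         if len(b) == maxs:
--             return b
--     return []
-- ===== Notes on version B (the rewrite author's own statement) =====
-- stated objective: simpler
-- what changed: B keeps the actual best subsequence list per index instead of dp-lengths plus prev pointers, so the backward pointer-chasing reconstruction pass and the running max disappear; the answer is the first stored list of maximal length.
import Mathlib
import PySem

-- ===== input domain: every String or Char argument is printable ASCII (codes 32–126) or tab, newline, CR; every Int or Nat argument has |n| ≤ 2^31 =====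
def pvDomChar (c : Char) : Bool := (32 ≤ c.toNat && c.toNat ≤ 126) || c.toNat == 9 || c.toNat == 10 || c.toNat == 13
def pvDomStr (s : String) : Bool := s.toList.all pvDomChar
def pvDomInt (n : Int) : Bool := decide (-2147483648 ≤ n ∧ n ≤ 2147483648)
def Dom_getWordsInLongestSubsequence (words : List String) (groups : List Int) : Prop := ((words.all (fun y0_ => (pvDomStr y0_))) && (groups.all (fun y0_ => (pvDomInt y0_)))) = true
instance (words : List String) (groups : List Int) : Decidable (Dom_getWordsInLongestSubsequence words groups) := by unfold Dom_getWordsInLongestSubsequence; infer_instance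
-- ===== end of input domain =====

-- B stores the best chain list per index, removing A's prev-pointer array and backward reconstruction; objective: simpler.


-- ===== PORT A =====
-- A's helper check(s1,s2): length test, then count differing positions by index; indices are in range, so getD is exact.
def pvCheck (s1 s2 : String) : Bool :=
  if s1.toList.length ≠ s2.toList.length then false
  else
    ((List.range s1.toList.length).foldl
      (fun (d : Int) i => d + (if s1.toList.getD i ' ' != s2.toList.getD i ' ' then 1 else 0)) 0) == 1

-- A's 'while i != -1' reconstruction loop; fuel (= n, a pure totality guard: each step strictly decreases i)
-- plays no role on the chains actually followed.  Visited i are ≥ 0, so i.toNat is exact.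
def pvChainAux (words : List String) (prevl : List Int) : Nat → Int → List String → List String
  | 0, _, res => res
  | fuel + 1, i, res =>
    if i = -1 then res
    else pvChainAux words prevl fuel (prevl.getD i.toNat 0) (res ++ [words.getD i.toNat ""])

-- A's 'for i in range(n): if dp[i] == maxs: <while loop>; break'
def pvFind (words : List String) (dpl prevl : List Int) (maxs : Int) (n : Nat) : List Nat → List String
  | [] => []
  | i :: rest =>
    if dpl.getD i 0 == maxs then pvChainAux words prevl n (i : Int) []
    else pvFind words dpl prevl maxs n rest

-- dp/prev indices i, j are always < n, so list getD/set are exact; groups.getD is exact under Pre_.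
def getWordsInLongestSubsequence (words : List String) (groups : List Int) : List String :=
  let n := words.length
  let st :=
    (List.range' 1 (n - 1)).foldl
      (fun (st : List Int × List Int × Int) i =>
        let p :=
          (List.range i).foldl
            (fun (p : List Int × List Int) j =>
              if groups.getD i 0 ≠ groups.getD j 0 ∧
                  pvCheck (words.getD i "") (words.getD j "") = true ∧
                  p.1.getD i 0 < p.1.getD j 0 + 1 then
                (p.1.set i (p.1.getD j 0 + 1), p.2.set i (j : Int))
              else p)
            (st.1, st.2.1)
        (p.1, p.2, max st.2.2 (p.1.getD i 0)))
      (List.replicate n (1 : Int), List.replicate n (-1 : Int), (1 : Int))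
  (pvFind words st.1 st.2.1 st.2.2 n (List.range n)).reverse

-- ===== PORT B =====
-- B's helper ham1: equal length and exactly one mismatch over zip.
def pvHam1 (s1 s2 : String) : Bool :=
  (s1.toList.length == s2.toList.length) &&
  ((s1.toList.zip s2.toList).countP (fun pr => pr.1 != pr.2) == 1)

def getWordsInLongestSubsequence_alt (words : List String) (groups : List Int) : List String :=
  let best :=
    (List.range words.length).foldl
      (fun (best : List (List String)) i =>
        let cur :=
          (List.range i).foldl
            (fun (cur : List String) j =>
              if groups.getD i 0 ≠ groups.getD j 0 ∧
                  pvHam1 (words.getD i "") (words.getD j "") = true ∧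
                  cur.length < (best.getD j []).length + 1 then
                best.getD j [] ++ [words.getD i ""]
              else cur)
            [words.getD i ""]
        best ++ [cur])
      []
  let maxs := best.foldl (fun (m : Nat) b => max m b.length) 0
  match best.find? (fun b => b.length == maxs) with
  | some b => b
  | none => []

-- ===== PRECONDITION & SPEC =====
-- Python A raises IndexError on groups[i] exactly when len(words) ≥ 2 and len(groups) < len(words).
def Pre_getWordsInLongestSubsequence (words : List String) (groups : List Int) : Prop :=
  words.length ≤ 1 ∨ words.length ≤ groups.length
instance (words : List String) (groups : List Int) : Decidable (Pre_getWordsInLongestSubsequence words groups) := by unfold Pre_getWordsInLongestSubsequence; infer_instance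

def pvWitness_getWordsInLongestSubsequence : List String × List Int := (["ab", "ac"], [1, 2])

def Spec_getWordsInLongestSubsequence (words : List String) (groups : List Int) (out : List String) : Prop := out = getWordsInLongestSubsequence_alt words groups
instance (words : List String) (groups : List Int) (out : List String) : Decidable (Spec_getWordsInLongestSubsequence words groups out) := by unfold Spec_getWordsInLongestSubsequence; infer_instance

-- ===== CLAIM (what is proved, stated in full; the proofs are below) =====
def Claim_equal_getWordsInLongestSubsequence : Prop := ∀ (words : List String) (groups : List Int), Dom_getWordsInLongestSubsequence words groups → Pre_getWordsInLongestSubsequence words groups → Spec_getWordsInLongestSubsequence words groups (getWordsInLongestSubsequence words groups)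

-- ===== LEMMAS AND PROOFS =====

-- Closed-form recursions for the two DP tables (proof-layer only; each is definitionally
-- the corresponding port's fold, so the assembly below bridges with rfl).

def pvDP (words : List String) (groups : List Int) : Nat → Int × Int
  | i => (List.range i).attach.foldl
      (fun p j =>
        if groups.getD i 0 ≠ groups.getD j.1 0 ∧ pvCheck (words.getD i "") (words.getD j.1 "") = true ∧
            p.1 < (pvDP words groups j.1).1 + 1 then
          ((pvDP words groups j.1).1 + 1, (j.1 : Int))
        else p)
      (1, -1)
decreasing_by all_goals exact List.mem_range.mp j.2

def pvBest (words : List String) (groups : List Int) : Nat → List String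
  | i => (List.range i).attach.foldl
      (fun cur j =>
        if groups.getD i 0 ≠ groups.getD j.1 0 ∧ pvHam1 (words.getD i "") (words.getD j.1 "") = true ∧
            cur.length < (pvBest words groups j.1).length + 1 then
          pvBest words groups j.1 ++ [words.getD i ""]
        else cur)
      [words.getD i ""]
decreasing_by all_goals exact List.mem_range.mp j.2

lemma pvBest_zero (words : List String) (groups : List Int) :
    pvBest words groups 0 = [words.getD 0 ""] := by
  rw [pvBest]; simp

def pvDPStep (words : List String) (groups : List Int) (i : Nat) (p : Int × Int) (j : Nat) :
    Int × Int :=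
  if groups.getD i 0 ≠ groups.getD j 0 ∧ pvCheck (words.getD i "") (words.getD j "") = true ∧
      p.1 < (pvDP words groups j).1 + 1 then
    ((pvDP words groups j).1 + 1, (j : Int))
  else p

def pvBestStep (words : List String) (groups : List Int) (i : Nat) (cur : List String) (j : Nat) :
    List String :=
  if groups.getD i 0 ≠ groups.getD j 0 ∧ pvHam1 (words.getD i "") (words.getD j "") = true ∧
      cur.length < (pvBest words groups j).length + 1 then
    pvBest words groups j ++ [words.getD i ""]
  else cur

lemma pvDP_eq (words : List String) (groups : List Int) (i : Nat) :
    pvDP words groups i = (List.range i).foldl (pvDPStep words groups i) (1, -1) := by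
  rw [pvDP]
  exact List.foldl_attach (f := pvDPStep words groups i)

lemma pvBest_eq (words : List String) (groups : List Int) (i : Nat) :
    pvBest words groups i = (List.range i).foldl (pvBestStep words groups i) [words.getD i ""] := by
  rw [pvBest]
  exact List.foldl_attach (f := pvBestStep words groups i)

-- check = ham1: both count the mismatching positions
lemma pvDiff_count (l1 l2 : List Char) (h : l1.length = l2.length) :
    (List.range l1.length).countP (fun i => l1.getD i ' ' != l2.getD i ' ')
      = (l1.zip l2).countP (fun pr => pr.1 != pr.2) := by
  induction l1 generalizing l2 with
  | nil => simp
  | cons a t ih =>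
    cases l2 with
    | nil => simp at h
    | cons b t2 =>
      have hcomp : ((fun i => (a :: t).getD i ' ' != (b :: t2).getD i ' ') ∘ Nat.succ)
          = (fun i => t.getD i ' ' != t2.getD i ' ') := by
        funext i; simp
      simp only [List.length_cons, List.range_succ_eq_map, List.countP_cons, List.countP_map,
        List.zip_cons_cons, hcomp, List.getD_cons_zero]
      rw [ih t2 (by simpa using h)]

lemma foldl_ind_count (l : List Nat) (c : Int) (p : Nat → Bool) :
    l.foldl (fun d i => d + (if p i then (1:Int) else 0)) c = c + (l.countP p : Int) := by
  induction l generalizing c with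
  | nil => simp
  | cons x t ih => by_cases hp : p x <;> simp [hp, ih] <;> omega

lemma check_eq_ham1 (s1 s2 : String) : pvCheck s1 s2 = pvHam1 s1 s2 := by
  unfold pvCheck pvHam1
  by_cases h : s1.toList.length = s2.toList.length
  · have h2 := pvDiff_count s1.toList s2.toList h
    simp only [h, ne_eq, not_true_eq_false, if_false, beq_self_eq_true, Bool.true_and,
      foldl_ind_count, zero_add] at *
    rw [h2]
    by_cases hc1 : (s1.toList.zip s2.toList).countP (fun pr => pr.1 != pr.2) = 1 <;>
      simp [hc1, beq_iff_eq] <;> omega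
  · rw [if_pos h]
    simp only [String.length_toList] at h
    simp [beq_iff_eq, h]

lemma foldl_rel {α β γ : Type} (R : α → β → Prop) (f : α → γ → α) (g : β → γ → β) :
    ∀ (l : List γ) (a : α) (b : β), R a b → (∀ x ∈ l, ∀ a b, R a b → R (f a x) (g b x)) →
      R (l.foldl f a) (l.foldl g b) := by
  intro l
  induction l with
  | nil => intro a b h _; exact h
  | cons x t ih =>
    intro a b h hstep
    exact ih _ _ (hstep x (by simp) a b h) (fun y hy => hstep y (by simp [hy]))

-- shape of (prev-pointer, chain) pairs
def pvShape (words : List String) (groups : List Int) (i : Nat) (p : Int) (cur : List String) : Prop :=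
  (p = -1 ∧ cur = [words.getD i ""]) ∨
  (∃ j, j < i ∧ p = (j : Int) ∧ cur = pvBest words groups j ++ [words.getD i ""])

lemma dp_best (words : List String) (groups : List Int) : ∀ i : Nat,
    (pvDP words groups i).1 = ((pvBest words groups i).length : Int) ∧
    pvShape words groups i (pvDP words groups i).2 (pvBest words groups i) := by
  intro i
  induction i using Nat.strong_induction_on with
  | _ i ih =>
    rw [pvDP_eq, pvBest_eq]
    refine foldl_rel (fun p cur => p.1 = (cur.length : Int) ∧ pvShape words groups i p.2 cur)
      _ _ (List.range i) (1, -1) [words.getD i ""] ⟨by simp, Or.inl ⟨rfl, rfl⟩⟩ ?_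
    intro j hj p cur hR
    have hji : j < i := List.mem_range.mp hj
    obtain ⟨hlen, hshape⟩ := hR
    have hdpj := (ih j hji).1
    unfold pvDPStep pvBestStep
    have hcond : (groups.getD i 0 ≠ groups.getD j 0 ∧ pvCheck (words.getD i "") (words.getD j "") = true ∧
        p.1 < (pvDP words groups j).1 + 1) ↔
        (groups.getD i 0 ≠ groups.getD j 0 ∧ pvHam1 (words.getD i "") (words.getD j "") = true ∧
        cur.length < (pvBest words groups j).length + 1) := by
      rw [check_eq_ham1, hdpj, hlen]
      constructor <;> rintro ⟨h1, h2, h3⟩ <;> refine ⟨h1, h2, ?_⟩ <;> exact_mod_cast h3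
    by_cases hc : groups.getD i 0 ≠ groups.getD j 0 ∧ pvHam1 (words.getD i "") (words.getD j "") = true ∧
        cur.length < (pvBest words groups j).length + 1
    · rw [if_pos (hcond.mpr hc), if_pos hc]
      exact ⟨by simp [hdpj], Or.inr ⟨j, hji, rfl, rfl⟩⟩
    · rw [if_neg (fun h => hc (hcond.mp h)), if_neg hc]
      exact ⟨hlen, hshape⟩

lemma getD_set_self {α : Type} (l : List α) (i : Nat) (v d : α) (h : i < l.length) :
    (l.set i v).getD i d = v := by
  simp [List.getD_eq_getElem?_getD, h]

lemma getD_set_ne {α : Type} (l : List α) (i j : Nat) (v d : α) (h : i ≠ j) :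
    (l.set i v).getD j d = l.getD j d := by
  simp [List.getD_eq_getElem?_getD, List.getElem?_set_ne h]

lemma getD_replicate_lt {α : Type} (n k : Nat) (a d : α) (h : k < n) :
    (List.replicate n a).getD k d = a := by
  simp [List.getD_eq_getElem?_getD, h]

lemma chain_neg_one (words : List String) (prevl : List Int) :
    ∀ (fuel : Nat) (res : List String), pvChainAux words prevl fuel (-1) res = res := by
  intro fuel res; cases fuel <;> simp [pvChainAux]

lemma chain_eq (words : List String) (groups : List Int) (prevl : List Int) (n : Nat)
    (hprev : ∀ k, k < n → prevl.getD k 0 = (pvDP words groups k).2) :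
    ∀ i, i < n → ∀ fuel, i < fuel → ∀ res,
      pvChainAux words prevl fuel (i : Int) res = res ++ (pvBest words groups i).reverse := by
  intro i
  induction i using Nat.strong_induction_on with
  | _ i ih =>
    intro hin fuel hfuel res
    obtain ⟨fuel, rfl⟩ : ∃ f, fuel = f + 1 := ⟨fuel - 1, by omega⟩
    rw [pvChainAux, if_neg (by omega), Int.toNat_natCast, hprev i hin]
    rcases (dp_best words groups i).2 with ⟨hp, hb⟩ | ⟨j, hji, hp, hb⟩
    · rw [hp, chain_neg_one, hb]; simp
    · rw [hp, ih j hji (by omega) fuel (by omega) (res ++ [words.getD i ""]), hb]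
      simp

-- B's accumulated best list (definitionally the port's fold)
def pvBInnerStep (words : List String) (groups : List Int) (i : Nat) (best : List (List String))
    (cur : List String) (j : Nat) : List String :=
  if groups.getD i 0 ≠ groups.getD j 0 ∧ pvHam1 (words.getD i "") (words.getD j "") = true ∧
      cur.length < (best.getD j []).length + 1 then
    best.getD j [] ++ [words.getD i ""]
  else cur

def pvBStep (words : List String) (groups : List Int) (best : List (List String)) (i : Nat) :
    List (List String) :=
  best ++ [(List.range i).foldl (pvBInnerStep words groups i best) [words.getD i ""]]

def pvBFold (words : List String) (groups : List Int) : List (List String) :=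
  (List.range words.length).foldl (pvBStep words groups) []

lemma best_char_aux (words : List String) (groups : List Int) : ∀ m : Nat,
    (List.range m).foldl (pvBStep words groups) [] = (List.range m).map (pvBest words groups) := by
  intro m
  induction m with
  | zero => rfl
  | succ m ih =>
    rw [List.range_succ, List.foldl_append, List.map_append, ih]
    simp only [List.foldl_cons, List.foldl_nil, List.map_cons, List.map_nil]
    unfold pvBStep
    congr 1
    rw [pvBest_eq]
    refine congrArg (fun c => [c]) ?_
    refine PySem.List.foldl_congr_mem' _ _ _ _ ?_
    intro j hj cur
    have hjm : j < m := List.mem_range.mp hj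
    have hg : ((List.range m).map (pvBest words groups)).getD j [] = pvBest words groups j := by
      simp [List.getD_eq_getElem?_getD, hjm]
    unfold pvBInnerStep pvBestStep
    rw [hg]

lemma best_char (words : List String) (groups : List Int) :
    pvBFold words groups = (List.range words.length).map (pvBest words groups) :=
  best_char_aux words groups words.length

-- A's DP state (definitionally the port's fold)
def pvAInnerStep (words : List String) (groups : List Int) (i : Nat) (p : List Int × List Int)
    (j : Nat) : List Int × List Int :=
  if groups.getD i 0 ≠ groups.getD j 0 ∧ pvCheck (words.getD i "") (words.getD j "") = true ∧
      p.1.getD i 0 < p.1.getD j 0 + 1 then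
    (p.1.set i (p.1.getD j 0 + 1), p.2.set i (j : Int))
  else p

def pvAStep (words : List String) (groups : List Int) (st : List Int × List Int × Int) (i : Nat) :
    List Int × List Int × Int :=
  let p := (List.range i).foldl (pvAInnerStep words groups i) (st.1, st.2.1)
  (p.1, p.2, max st.2.2 (p.1.getD i 0))

def pvAFold (words : List String) (groups : List Int) (m : Nat) : List Int × List Int × Int :=
  (List.range' 1 m).foldl (pvAStep words groups)
    (List.replicate words.length (1 : Int), List.replicate words.length (-1 : Int), (1 : Int))

lemma a_inner (words : List String) (groups : List Int) (n i : Nat) (hi : i < n)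
    (dpl prevl : List Int) (h1 : dpl.length = n) (h2 : prevl.length = n)
    (hdp : ∀ j, j < i → dpl.getD j 0 = (pvDP words groups j).1)
    (hdpi : dpl.getD i 0 = 1) (hpi : prevl.getD i 0 = -1) :
    ((List.range i).foldl (pvAInnerStep words groups i) (dpl, prevl)).1.length = n ∧
    ((List.range i).foldl (pvAInnerStep words groups i) (dpl, prevl)).2.length = n ∧
    ((List.range i).foldl (pvAInnerStep words groups i) (dpl, prevl)).1.getD i 0
      = (pvDP words groups i).1 ∧
    ((List.range i).foldl (pvAInnerStep words groups i) (dpl, prevl)).2.getD i 0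
      = (pvDP words groups i).2 ∧
    (∀ k, k < n → k ≠ i →
      ((List.range i).foldl (pvAInnerStep words groups i) (dpl, prevl)).1.getD k 0 = dpl.getD k 0 ∧
      ((List.range i).foldl (pvAInnerStep words groups i) (dpl, prevl)).2.getD k 0
        = prevl.getD k 0) := by
  have main := foldl_rel
    (fun (s : List Int × List Int) (q : Int × Int) =>
      s.1.length = n ∧ s.2.length = n ∧ s.1.getD i 0 = q.1 ∧ s.2.getD i 0 = q.2 ∧
      (∀ k, k < n → k ≠ i → s.1.getD k 0 = dpl.getD k 0 ∧ s.2.getD k 0 = prevl.getD k 0))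
    (pvAInnerStep words groups i) (pvDPStep words groups i)
    (List.range i) (dpl, prevl) (1, -1)
    ⟨h1, h2, hdpi, hpi, fun _ _ _ => ⟨rfl, rfl⟩⟩
    (by
      intro j hj s q hR
      have hji : j < i := List.mem_range.mp hj
      obtain ⟨l1, l2, e1, e2, unch⟩ := hR
      have hjn : j < n := lt_trans hji hi
      have hsj : s.1.getD j 0 = (pvDP words groups j).1 := by
        rw [(unch j hjn (by omega)).1]; exact hdp j hji
      unfold pvAInnerStep pvDPStep
      by_cases hc : groups.getD i 0 ≠ groups.getD j 0 ∧
          pvCheck (words.getD i "") (words.getD j "") = true ∧ q.1 < (pvDP words groups j).1 + 1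
      · rw [if_pos (by rw [e1, hsj]; exact hc), if_pos hc]
        refine ⟨by simpa using l1, by simpa using l2, ?_, ?_, ?_⟩
        · rw [getD_set_self _ _ _ _ (by omega), hsj]
        · rw [getD_set_self _ _ _ _ (by omega)]
        · intro k hk hki
          rw [getD_set_ne _ _ _ _ _ (fun h => hki h.symm),
            getD_set_ne _ _ _ _ _ (fun h => hki h.symm)]
          exact unch k hk hki
      · rw [if_neg (by rw [e1, hsj]; exact hc), if_neg hc]
        exact ⟨l1, l2, e1, e2, unch⟩)
  obtain ⟨m1, m2, m3, m4, m5⟩ := main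
  rw [← pvDP_eq] at m3 m4
  exact ⟨m1, m2, m3, m4, m5⟩

lemma a_outer (words : List String) (groups : List Int) (n : Nat) (hn : n = words.length) :
    ∀ m, m < n →
      (pvAFold words groups m).1.length = n ∧
      (pvAFold words groups m).2.1.length = n ∧
      (∀ k, k < n →
        (pvAFold words groups m).1.getD k 0 = (if k ≤ m then (pvDP words groups k).1 else 1) ∧
        (pvAFold words groups m).2.1.getD k 0 = (if k ≤ m then (pvDP words groups k).2 else -1)) ∧
      (pvAFold words groups m).2.2
        = (List.range' 1 m).foldl (fun a i => max a (pvDP words groups i).1) 1 := by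
  intro m
  induction m with
  | zero =>
    intro _
    refine ⟨by simp [pvAFold, hn], by simp [pvAFold, hn], ?_, by simp [pvAFold]⟩
    intro k hk
    have hk' : k < words.length := by omega
    constructor
    · rw [show (pvAFold words groups 0).1 = List.replicate words.length (1:Int) from rfl,
        getD_replicate_lt _ _ _ _ hk']
      have h0 : (pvDP words groups 0).1 = 1 := by rw [pvDP_eq]; rfl
      by_cases hz : k = 0 <;> simp [hz, h0]
    · rw [show (pvAFold words groups 0).2.1 = List.replicate words.length (-1:Int) from rfl,
        getD_replicate_lt _ _ _ _ hk']
      have h0 : (pvDP words groups 0).2 = -1 := by rw [pvDP_eq]; rfl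
      by_cases hz : k = 0 <;> simp [hz, h0]
  | succ m ih =>
    intro hm
    have hmn : m < n := by omega
    obtain ⟨i1, i2, ipt, imax⟩ := ih hmn
    have hstep : pvAFold words groups (m + 1)
        = pvAStep words groups (pvAFold words groups m) (1 + m) := by
      rw [pvAFold, List.range'_1_concat, List.foldl_append]
      rfl
    have hi : 1 + m < n := by omega
    have hinner := a_inner words groups n (1 + m) hi
      (pvAFold words groups m).1 (pvAFold words groups m).2.1 i1 i2
      (fun j hj => by rw [(ipt j (by omega)).1, if_pos (by omega)])
      (by rw [(ipt (1 + m) (by omega)).1, if_neg (by omega)])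
      (by rw [(ipt (1 + m) (by omega)).2, if_neg (by omega)])
    obtain ⟨j1, j2, j3, j4, j5⟩ := hinner
    rw [hstep]
    unfold pvAStep
    refine ⟨j1, j2, ?_, ?_⟩
    · intro k hk
      by_cases hki : k = 1 + m
      · subst hki
        simp only [j3, j4]
        rw [if_pos (by omega), if_pos (by omega)]
        exact ⟨rfl, rfl⟩
      · obtain ⟨u1, u2⟩ := j5 k hk hki
        simp only [u1, u2]
        rw [(ipt k hk).1, (ipt k hk).2]
        by_cases hkm : k ≤ m
        · rw [if_pos hkm, if_pos (by omega), if_pos hkm, if_pos (by omega)]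
          exact ⟨rfl, rfl⟩
        · rw [if_neg hkm, if_neg (by omega), if_neg hkm, if_neg (by omega)]
          exact ⟨rfl, rfl⟩
    · simp only [j3, imax]
      rw [List.range'_1_concat, List.foldl_append]
      rfl

lemma fold_max_cast (f : Nat → Nat) : ∀ (l : List Nat) (c : Nat),
    l.foldl (fun (a : Int) i => max a ((f i : Nat) : Int)) (c : Int)
      = ((l.foldl (fun a i => max a (f i)) c : Nat) : Int) := by
  intro l
  induction l with
  | nil => intro c; rfl
  | cons x t ih =>
    intro c
    simp only [List.foldl_cons]
    rw [← Nat.cast_max, ih]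

lemma find_eq (words : List String) (groups : List Int) (dpl prevl : List Int) (maxs : Int)
    (n : Nat)
    (hdp : ∀ k, k < n → dpl.getD k 0 = (pvDP words groups k).1)
    (hprev : ∀ k, k < n → prevl.getD k 0 = (pvDP words groups k).2) :
    ∀ l : List Nat, (∀ k ∈ l, k < n) →
      pvFind words dpl prevl maxs n l =
        (match l.find? (fun k => ((pvBest words groups k).length : Int) == maxs) with
          | some k => (pvBest words groups k).reverse
          | none => []) := by
  intro l
  induction l with
  | nil => intro _; rfl
  | cons k rest ih =>
    intro hmem
    have hkn : k < n := hmem k (by simp)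
    have hdpk : dpl.getD k 0 = ((pvBest words groups k).length : Int) := by
      rw [hdp k hkn, (dp_best words groups k).1]
    rw [pvFind, hdpk]
    by_cases hc : (((pvBest words groups k).length : Int) == maxs) = true
    · rw [if_pos hc, List.find?_cons_of_pos (p := fun k => ((pvBest words groups k).length : Int) == maxs) hc]
      exact chain_eq words groups prevl n hprev k hkn n (by omega) []
    · rw [if_neg (by simpa using hc), List.find?_cons_of_neg (p := fun k => ((pvBest words groups k).length : Int) == maxs) (by simpa using hc)]
      exact ih (fun x hx => hmem x (by simp [hx]))

-- ===== VERDICT (by name: the statement is the Claim_ definition above) =====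
theorem getWordsInLongestSubsequence_spec : Claim_equal_getWordsInLongestSubsequence := by
  unfold Claim_equal_getWordsInLongestSubsequence
  intro words groups _ _
  unfold Spec_getWordsInLongestSubsequence
  have hA : getWordsInLongestSubsequence words groups
      = (pvFind words (pvAFold words groups (words.length - 1)).1
          (pvAFold words groups (words.length - 1)).2.1
          (pvAFold words groups (words.length - 1)).2.2 words.length
          (List.range words.length)).reverse := rfl
  have hB : getWordsInLongestSubsequence_alt words groups
      = (match (pvBFold words groups).find?
            (fun b => b.length
              == (pvBFold words groups).foldl (fun (m : Nat) b => max m b.length) 0) with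
          | some b => b
          | none => []) := rfl
  rcases Nat.eq_zero_or_pos words.length with h0 | hpos
  · rw [List.length_eq_zero_iff] at h0
    subst h0
    rfl
  · obtain ⟨a1, a2, apt, amax⟩ :=
      a_outer words groups words.length rfl (words.length - 1) (by omega)
    have hdp : ∀ k, k < words.length →
        (pvAFold words groups (words.length - 1)).1.getD k 0 = (pvDP words groups k).1 :=
      fun k hk => by rw [(apt k hk).1, if_pos (by omega)]
    have hprev : ∀ k, k < words.length →
        (pvAFold words groups (words.length - 1)).2.1.getD k 0 = (pvDP words groups k).2 :=
      fun k hk => by rw [(apt k hk).2, if_pos (by omega)]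
    -- the two maxima agree (as Int and Nat)
    have hmaxA : (pvAFold words groups (words.length - 1)).2.2
        = (((List.range' 1 (words.length - 1)).foldl
            (fun a i => max a (pvBest words groups i).length) 1 : Nat) : Int) := by
      rw [amax]
      rw [PySem.List.foldl_congr_mem'
        (List.range' 1 (words.length - 1))
        (fun a i => max a (pvDP words groups i).1)
        (fun (a : Int) i => max a (((pvBest words groups i).length : Nat) : Int))
        1 (fun x _ acc => by
          show max acc (pvDP words groups x).1
            = max acc (((pvBest words groups x).length : Nat) : Int)
          rw [(dp_best words groups x).1])]
      have := fold_max_cast (fun i => (pvBest words groups i).length)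
        (List.range' 1 (words.length - 1)) 1
      simpa using this
    have hsplit : List.range words.length = 0 :: List.range' 1 (words.length - 1) := by
      rw [List.range_eq_range']
      conv_lhs => rw [show words.length = (words.length - 1) + 1 from by omega]
      rw [List.range'_succ]
    have hmaxB : (pvBFold words groups).foldl (fun (m : Nat) b => max m b.length) 0
        = (List.range' 1 (words.length - 1)).foldl
            (fun a i => max a (pvBest words groups i).length) 1 := by
      rw [best_char, List.foldl_map, hsplit]
      simp [pvBest_zero]
    rw [hA, hB, find_eq words groups _ _ _ words.length hdp hprev (List.range words.length)
      (fun k hk => List.mem_range.mp hk)]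
    rw [hmaxB, best_char, List.find?_map, hmaxA, hsplit]
    have hpred : (fun k => ((pvBest words groups k).length : Int)
          == (((List.range' 1 (words.length - 1)).foldl
              (fun a i => max a (pvBest words groups i).length) 1 : Nat) : Int))
        = (fun k => (pvBest words groups k).length
            == (List.range' 1 (words.length - 1)).foldl
              (fun a i => max a (pvBest words groups i).length) 1) := by
      funext k
      by_cases h : (pvBest words groups k).length
          = (List.range' 1 (words.length - 1)).foldl
              (fun a i => max a (pvBest words groups i).length) 1 <;>
        simp [h, beq_iff_eq, Nat.cast_inj]
    rw [hpred]
    cases hfind : (0 :: List.range' 1 (words.length - 1)).find?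
        ((fun b => b.length
            == (List.range' 1 (words.length - 1)).foldl
              (fun a i => max a (pvBest words groups i).length) 1) ∘ pvBest words groups) with
    | none =>
      rw [show ((fun b => b.length
            == (List.range' 1 (words.length - 1)).foldl
              (fun a i => max a (pvBest words groups i).length) 1) ∘ pvBest words groups)
          = (fun k => (pvBest words groups k).length
              == (List.range' 1 (words.length - 1)).foldl
                (fun a i => max a (pvBest words groups i).length) 1) from rfl] at hfind
      rw [hfind]
      rfl
    | some k =>
      rw [show ((fun b => b.length
            == (List.range' 1 (words.length - 1)).foldl
              (fun a i => max a (pvBest words groups i).length) 1) ∘ pvBest words groups)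
          = (fun k => (pvBest words groups k).length
              == (List.range' 1 (words.length - 1)).foldl
                (fun a i => max a (pvBest words groups i).length) 1) from rfl] at hfind
      rw [hfind]
      simp
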